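-- pv_equiv track=rewrite | github.com/tirth2014/DSA-Python | Heaps/Convert Min Heap To Max Heap.py | minToMaxHeap
-- ===== SOURCE A (Python) =====
-- from typing import List
--
-- def minToMaxHeap(n: int, heap: List[int]) -> List[int]:
--
--     def heapify(i):
--         largest = i
--         left_child = 2*i+1
--         right_child = 2*i+2
--
--         if left_child < n and heap[left_child] > heap[largest]:
--             largest = left_child
--
--         if right_child < n and heap[right_child] > heap[largest]:
--             largest = right_child
--
--         if largest != i:
--             heap[largest], heap[i] = heap[i], heap[largest]
--             heapify(largest)
--
--     # call heapify for all internal nodes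
--     for idx in range (((n-2)//2), -1, -1):
--         heapify(idx)
--
--
--     return heap
-- ===== SOURCE B (Python) =====
-- from typing import List
--
-- def minToMaxHeap(n: int, heap: List[int]) -> List[int]:
--     # Plan-then-execute sift-down: for each internal node, first compute the full
--     # descent path read-only (using a single max-based child test), then shift the
--     # values along the path up by one and drop the saved value at the end.
--     # Mutates heap in place like the original.
--     for idx in range((n - 2) // 2, -1, -1):
--         v = heap[idx]
--         # phase 1: plan the descent path without writing
--         path = [idx]
--         i = idx
--         while True:
--             l, r = 2 * i + 1, 2 * i + 2
--             if r < n and heap[r] > max(v, heap[l]):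
--                 i = r
--             elif l < n and heap[l] > v:
--                 i = l
--             else:
--                 break
--             path.append(i)
--         # phase 2: shift each path element's value to its parent, place v last
--         for j in range(len(path) - 1):
--             heap[path[j]] = heap[path[j + 1]]
--         heap[path[-1]] = v
--     return heap
-- ===== Notes on version B (the rewrite author's own statement) =====
-- stated objective: alternative
-- what changed: Replaces the recursive swap-based heapify with a two-phase plan-then-execute sift-down: a read-only descent that records the path using a single max-based child comparison, followed by a separate pass that shifts the path's values up and writes the saved value once.
-- outside the precondition, e.g. on minToMaxHeap(3, [1, 2]): A raises IndexError, B raises IndexError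
import Mathlib
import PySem

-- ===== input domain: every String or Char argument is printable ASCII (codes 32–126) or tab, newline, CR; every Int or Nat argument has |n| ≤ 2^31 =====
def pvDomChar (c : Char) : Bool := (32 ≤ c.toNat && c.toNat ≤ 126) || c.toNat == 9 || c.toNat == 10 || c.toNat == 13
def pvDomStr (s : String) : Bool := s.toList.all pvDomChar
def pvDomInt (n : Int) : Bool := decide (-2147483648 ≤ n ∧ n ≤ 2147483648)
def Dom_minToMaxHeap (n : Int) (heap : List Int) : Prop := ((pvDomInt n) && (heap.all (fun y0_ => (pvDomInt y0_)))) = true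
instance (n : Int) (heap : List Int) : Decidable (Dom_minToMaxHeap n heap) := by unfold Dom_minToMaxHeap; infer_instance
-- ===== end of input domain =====

-- B replaces the recursive swap-based heapify with a two-phase plan-then-execute sift-down:
-- a read-only descent computes the path, then a separate pass shifts values along it
-- (objective: alternative). Both A and B mutate `heap` in place in Python and return it;
-- the theorems are about the returned value, and B performs the same in-place mutation.


-- ===== PORT A =====
-- A's recursive heapify; the fuel only makes the recursion total (indices strictly grow,
-- so fuel n.toNat is never exhausted on admitted inputs).
def pvHeapifyA (n : Int) (fuel : Nat) (heap : List Int) (i : Nat) : List Int :=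
  match fuel with
  | 0 => heap
  | fuel + 1 =>
    let l := 2 * i + 1
    let r := 2 * i + 2
    let largest1 := if (l : Int) < n ∧ heap.getD l 0 > heap.getD i 0 then l else i
    let largest2 := if (r : Int) < n ∧ heap.getD r 0 > heap.getD largest1 0 then r else largest1
    if largest2 ≠ i then
      pvHeapifyA n fuel ((heap.set largest2 (heap.getD i 0)).set i (heap.getD largest2 0)) largest2
    else heap

def minToMaxHeap (n : Int) (heap : List Int) : List Int :=
  (PySem.List.pyRange (PySem.Int.floordiv (n - 2) 2) (-1) (-1)).foldl
    (fun h idx => pvHeapifyA n n.toNat h idx.toNat) heap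

-- ===== PORT B =====
-- Phase 1 of B: the read-only descent plan (the path below the start index);
-- the fuel only makes the while-loop total.
def pvPlanB (n : Int) (fuel : Nat) (heap : List Int) (v : Int) (i : Nat) : List Nat :=
  match fuel with
  | 0 => []
  | fuel + 1 =>
    if ((2 * i + 2 : Nat) : Int) < n ∧ heap.getD (2 * i + 2) 0 > max v (heap.getD (2 * i + 1) 0) then
      (2 * i + 2) :: pvPlanB n fuel heap v (2 * i + 2)
    else if ((2 * i + 1 : Nat) : Int) < n ∧ heap.getD (2 * i + 1) 0 > v then
      (2 * i + 1) :: pvPlanB n fuel heap v (2 * i + 1)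
    else []

-- Phase 2 of B: shift each path element's value to its parent, place v at the end.
def pvShiftB (heap : List Int) (v : Int) : List Nat → List Int
  | [] => heap
  | [p] => heap.set p v
  | p :: q :: rest => pvShiftB (heap.set p (heap.getD q 0)) v (q :: rest)

def minToMaxHeap_alt (n : Int) (heap : List Int) : List Int :=
  (PySem.List.pyRange (PySem.Int.floordiv (n - 2) 2) (-1) (-1)).foldl
    (fun h idx =>
      pvShiftB h (h.getD idx.toNat 0)
        (idx.toNat :: pvPlanB n n.toNat h (h.getD idx.toNat 0) idx.toNat)) heap

-- ===== PRECONDITION & SPEC =====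
-- Pre_ excludes exactly the inputs where A raises IndexError: whenever 2 ≤ n and
-- heap.length < n some child index < n but ≥ len(heap) is read; for n ≤ 1 the loop is empty.
def Pre_minToMaxHeap (n : Int) (heap : List Int) : Prop :=
  n ≤ (heap.length : Int) ∨ n ≤ 1
instance (n : Int) (heap : List Int) : Decidable (Pre_minToMaxHeap n heap) := by
  unfold Pre_minToMaxHeap; infer_instance

def pvWitness_minToMaxHeap : Int × List Int := (4, [1, 3, 2, 4])

def Spec_minToMaxHeap (n : Int) (heap : List Int) (out : List Int) : Prop := out = minToMaxHeap_alt n heap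
instance (n : Int) (heap : List Int) (out : List Int) : Decidable (Spec_minToMaxHeap n heap out) := by unfold Spec_minToMaxHeap; infer_instance

-- ===== CLAIM (what is proved, stated in full; the proofs are below) =====
def Claim_equal_minToMaxHeap : Prop := ∀ (n : Int) (heap : List Int), Dom_minToMaxHeap n heap → Pre_minToMaxHeap n heap → Spec_minToMaxHeap n heap (minToMaxHeap n heap)

-- ===== LEMMAS AND PROOFS =====

theorem pvHeapifyA_length (n : Int) (fuel : Nat) :
    ∀ (heap : List Int) (i : Nat), (pvHeapifyA n fuel heap i).length = heap.length := by
  induction fuel with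
  | zero => intro heap i; rfl
  | succ fuel ih =>
    intro heap i
    simp only [pvHeapifyA]
    repeat' split
    all_goals first | (rw [ih]; simp) | rfl

theorem pv_set_rearrange (heap : List Int) (i j : Nat) (v x : Int) (h : j ≠ i) :
    ((heap.set i v).set j v).set i x = (heap.set i x).set j v := by
  rw [List.set_comm _ _ h, List.set_set]

-- the plan only reads indices strictly above the start index, so an earlier write is invisible
theorem pvPlan_set_irrel (n : Int) (fuel : Nat) :
    ∀ (heap : List Int) (x v : Int) (i j : Nat), i < j →
      pvPlanB n fuel (heap.set i x) v j = pvPlanB n fuel heap v j := by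
  induction fuel with
  | zero => intro heap x v i j _; rfl
  | succ fuel ih =>
    intro heap x v i j hij
    have h1 : (heap.set i x).getD (2 * j + 1) 0 = heap.getD (2 * j + 1) 0 := by
      simp [List.getD, List.getElem?_set_ne (by omega : i ≠ 2 * j + 1)]
    have h2 : (heap.set i x).getD (2 * j + 2) 0 = heap.getD (2 * j + 2) 0 := by
      simp [List.getD, List.getElem?_set_ne (by omega : i ≠ 2 * j + 2)]
    simp only [pvPlanB, h1, h2]
    split
    · rw [ih _ x v i _ (by omega)]
    · split
      · rw [ih _ x v i _ (by omega)]
      · rfl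

-- A's heapify step on heap.set i v, with both child tests phrased over the original heap
theorem pvHeapifyA_step (n : Int) (fuel : Nat) (heap : List Int) (v : Int) (i : Nat)
    (hilen : i < heap.length) :
    pvHeapifyA n (fuel + 1) (heap.set i v) i =
      if ((2 * i + 2 : Nat) : Int) < n ∧
          heap.getD (2 * i + 2) 0 > max v (heap.getD (2 * i + 1) 0) then
        pvHeapifyA n fuel ((heap.set i (heap.getD (2 * i + 2) 0)).set (2 * i + 2) v) (2 * i + 2)
      else if ((2 * i + 1 : Nat) : Int) < n ∧ heap.getD (2 * i + 1) 0 > v then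
        pvHeapifyA n fuel ((heap.set i (heap.getD (2 * i + 1) 0)).set (2 * i + 1) v) (2 * i + 1)
      else heap.set i v := by
  have hgi : (heap.set i v).getD i 0 = v := by
    simp [List.getD, hilen]
  have hgl : (heap.set i v).getD (2 * i + 1) 0 = heap.getD (2 * i + 1) 0 := by
    simp [List.getD, List.getElem?_set_ne (by omega : i ≠ 2 * i + 1)]
  have hgr : (heap.set i v).getD (2 * i + 2) 0 = heap.getD (2 * i + 2) 0 := by
    simp [List.getD, List.getElem?_set_ne (by omega : i ≠ 2 * i + 2)]
  simp only [pvHeapifyA, hgi, hgl, hgr]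
  by_cases hLc : ((2 * i + 1 : Nat) : Int) < n ∧ heap.getD (2 * i + 1) 0 > v
  · rw [if_pos hLc, hgl]
    by_cases hRc : ((2 * i + 2 : Nat) : Int) < n ∧
        heap.getD (2 * i + 2) 0 > heap.getD (2 * i + 1) 0
    · rw [if_pos hRc, if_pos (by omega : (2 * i + 2 : Nat) ≠ i), hgr,
        pv_set_rearrange heap i (2 * i + 2) v _ (by omega),
        if_pos ⟨hRc.1, by rw [max_eq_right (le_of_lt hLc.2)]; exact hRc.2⟩]
    · rw [if_neg hRc, if_pos (by omega : (2 * i + 1 : Nat) ≠ i), hgl,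
        pv_set_rearrange heap i (2 * i + 1) v _ (by omega),
        if_neg (fun hc => hRc ⟨hc.1, lt_of_le_of_lt (le_max_right v _) hc.2⟩),
        if_pos hLc]
  · rw [if_neg hLc, hgi]
    by_cases hRc : ((2 * i + 2 : Nat) : Int) < n ∧ heap.getD (2 * i + 2) 0 > v
    · have hln : ((2 * i + 1 : Nat) : Int) < n := by
        have := hRc.1; push_cast at this ⊢; omega
      have hlv : heap.getD (2 * i + 1) 0 ≤ v := by
        by_contra hlt; exact hLc ⟨hln, by omega⟩
      rw [if_pos hRc, if_pos (by omega : (2 * i + 2 : Nat) ≠ i), hgr,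
        pv_set_rearrange heap i (2 * i + 2) v _ (by omega),
        if_pos ⟨hRc.1, by rw [max_eq_left hlv]; exact hRc.2⟩]
    · rw [if_neg hRc, if_neg (by omega : ¬ (i ≠ i)),
        if_neg (fun hc => hRc ⟨hc.1, lt_of_le_of_lt (le_max_left v _) hc.2⟩),
        if_neg hLc]

-- core: B's plan-then-shift on (heap, saved value v, start i) equals A's swap heapify
-- run on the array with v written back at i.
theorem pvShift_eq_heapify (n : Int) (fuel : Nat) :
    ∀ (heap : List Int) (v : Int) (i : Nat),
      n ≤ (heap.length : Int) → (i : Int) < n →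
      pvShiftB heap v (i :: pvPlanB n fuel heap v i) = pvHeapifyA n fuel (heap.set i v) i := by
  induction fuel with
  | zero => intro heap v i _ _; rfl
  | succ fuel ih =>
    intro heap v i hn hi
    have hilen : i < heap.length := by omega
    rw [pvHeapifyA_step n fuel heap v i hilen]
    simp only [pvPlanB]
    by_cases hR : ((2 * i + 2 : Nat) : Int) < n ∧
        heap.getD (2 * i + 2) 0 > max v (heap.getD (2 * i + 1) 0)
    · rw [if_pos hR, if_pos hR]
      show pvShiftB (heap.set i (heap.getD (2 * i + 2) 0)) v
          ((2 * i + 2) :: pvPlanB n (fuel) heap v (2 * i + 2)) = _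
      rw [← pvPlan_set_irrel n fuel heap (heap.getD (2 * i + 2) 0) v i (2 * i + 2) (by omega)]
      exact ih _ v _ (by simpa using hn) (by exact_mod_cast hR.1)
    · rw [if_neg hR, if_neg hR]
      by_cases hL : ((2 * i + 1 : Nat) : Int) < n ∧ heap.getD (2 * i + 1) 0 > v
      · rw [if_pos hL, if_pos hL]
        show pvShiftB (heap.set i (heap.getD (2 * i + 1) 0)) v
            ((2 * i + 1) :: pvPlanB n (fuel) heap v (2 * i + 1)) = _
        rw [← pvPlan_set_irrel n fuel heap (heap.getD (2 * i + 1) 0) v i (2 * i + 1) (by omega)]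
        exact ih _ v _ (by simpa using hn) (by exact_mod_cast hL.1)
      · rw [if_neg hL, if_neg hL]
        rfl

theorem pv_fold_eq (n : Int) :
    ∀ (idxs : List Int) (heap : List Int),
      n ≤ (heap.length : Int) → (∀ idx ∈ idxs, 0 ≤ idx ∧ idx < n) →
      idxs.foldl (fun h idx => pvHeapifyA n n.toNat h idx.toNat) heap
        = idxs.foldl (fun h idx =>
            pvShiftB h (h.getD idx.toNat 0)
              (idx.toNat :: pvPlanB n n.toNat h (h.getD idx.toNat 0) idx.toNat)) heap := by
  intro idxs
  induction idxs with
  | nil => intro heap _ _; rfl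
  | cons idx rest ih =>
    intro heap hn hmem
    obtain ⟨h0, hlt⟩ := hmem idx (by simp)
    have hilen : idx.toNat < heap.length := by omega
    have hstep : pvShiftB heap (heap.getD idx.toNat 0)
          (idx.toNat :: pvPlanB n n.toNat heap (heap.getD idx.toNat 0) idx.toNat)
        = pvHeapifyA n n.toNat heap idx.toNat := by
      rw [pvShift_eq_heapify n n.toNat heap _ _ hn (by omega)]
      congr 1
      simp [List.getD, List.getElem?_eq_getElem hilen]
    simp only [List.foldl_cons, hstep]
    exact ih _ (by rw [pvHeapifyA_length]; exact hn) (fun j hj => hmem j (by simp [hj]))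

-- ===== VERDICT (by name: the statement is the Claim_ definition above) =====
theorem minToMaxHeap_spec : Claim_equal_minToMaxHeap := by
  intro n heap _ hpre
  unfold Spec_minToMaxHeap minToMaxHeap minToMaxHeap_alt
  by_cases hn : n ≤ (heap.length : Int)
  · apply pv_fold_eq n _ heap hn
    intro idx hidx
    rw [PySem.List.mem_pyRange_neg_one] at hidx
    have hfd : PySem.Int.floordiv (n - 2) 2 = (n - 2) / 2 :=
      PySem.Int.floordiv_eq_ediv_of_pos (by omega)
    rw [hfd] at hidx
    omega
  · have hn1 : n ≤ 1 := hpre.resolve_left hn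
    have : PySem.Int.floordiv (n - 2) 2 ≤ -1 := by
      rw [PySem.Int.floordiv_eq_ediv_of_pos (by omega)]; omega
    rw [PySem.List.pyRange_neg_one_eq_nil this]
    rfl
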